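-- pv_equiv track=rewrite | github.com/shankar-1403/pcred_financial_analyzer | backend/banks/csb.py | _detect_columns_csb
-- ===== SOURCE A (Python) =====
-- HEADER_MAP = {
--     "date": [
--         "date",
--     ],
--     "description": [
--         "details",
--         "description",
--         "narration",
--     ],
--     "cheque": [
--         "ref no./cheque no.",
--         "ref no",
--         "cheque no",
--         "reference no",
--     ],
--     "debit": [
--         "debit",
--         "withdrawal",
--         "dr",
--     ],
--     "credit": [
--         "credit",
--         "deposit",
--         "cr",
--     ],
--     "balance": [
--         "balance",
--         "running balance",
--     ],
-- }
--
-- def _detect_columns_csb(row_clean):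
--     """
--     CSB-specific column detector — avoids base.detect_columns substring bug.
--     Uses exact match first, then guarded substring (4+ chars only).
--     base.py is never modified.
--     """
--     mapping = {}
--     for field, variants in HEADER_MAP.items():
--         # Pass 1: exact match
--         for idx, cell in enumerate(row_clean):
--             if cell in variants:
--                 mapping[field] = idx
--                 break
--         if field in mapping:
--             continue
--         # Pass 2: substring only for 4+ char aliases
--         for idx, cell in enumerate(row_clean):
--             if any(len(v) >= 4 and v in cell for v in variants):
--                 mapping[field] = idx
--                 break
--     return mapping if len(mapping) >= 3 else None
-- ===== SOURCE B (Python) =====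
-- HEADER_MAP = {
--     "date": [
--         "date",
--     ],
--     "description": [
--         "details",
--         "description",
--         "narration",
--     ],
--     "cheque": [
--         "ref no./cheque no.",
--         "ref no",
--         "cheque no",
--         "reference no",
--     ],
--     "debit": [
--         "debit",
--         "withdrawal",
--         "dr",
--     ],
--     "credit": [
--         "credit",
--         "deposit",
--         "cr",
--     ],
--     "balance": [
--         "balance",
--         "running balance",
--     ],
-- }
--
-- def _detect_columns_csb(row_clean):
--     """Inverted loop nesting: ONE left-to-right pass over the row records, per
--     field, the first exact hit and the first guarded (4+ char) substring hit
--     into two tables; a final pass over HEADER_MAP assembles the mapping in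
--     field order, preferring the exact table."""
--     exact = {}
--     sub = {}
--     for idx, cell in enumerate(row_clean):
--         for field, variants in HEADER_MAP.items():
--             if field not in exact and cell in variants:
--                 exact[field] = idx
--             if field not in sub and any(len(v) >= 4 and v in cell for v in variants):
--                 sub[field] = idx
--     mapping = {}
--     for field in HEADER_MAP:
--         if field in exact:
--             mapping[field] = exact[field]
--         elif field in sub:
--             mapping[field] = sub[field]
--     return mapping if len(mapping) >= 3 else None
-- ===== Notes on version B (the rewrite author's own statement) =====
-- stated objective: alternative
-- what changed: B inverts the loop nesting: instead of A's two row scans per field, B makes one left-to-right pass over the row that fills per-field first-exact-hit and first-guarded-substring-hit tables for all fields at once, then assembles the mapping in HEADER_MAP order preferring the exact table.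
import Mathlib
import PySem

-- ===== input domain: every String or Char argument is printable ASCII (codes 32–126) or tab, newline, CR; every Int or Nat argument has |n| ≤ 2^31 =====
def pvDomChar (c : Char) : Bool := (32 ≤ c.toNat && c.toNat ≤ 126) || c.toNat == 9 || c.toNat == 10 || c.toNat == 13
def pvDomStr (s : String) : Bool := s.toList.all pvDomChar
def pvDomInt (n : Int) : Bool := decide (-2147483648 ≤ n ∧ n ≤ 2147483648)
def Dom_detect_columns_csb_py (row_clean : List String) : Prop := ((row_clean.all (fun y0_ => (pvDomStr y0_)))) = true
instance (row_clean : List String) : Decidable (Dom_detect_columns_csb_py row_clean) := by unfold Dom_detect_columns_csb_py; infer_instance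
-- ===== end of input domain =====

-- B inverts the loop nesting: one left-to-right pass over the row fills per-field
-- first-exact-hit and first-substring-hit tables, assembled afterwards in field order
-- (same values; objective: alternative).

-- HEADER_MAP (shared module constant, iterated in insertion order)
def headerMap : List (String × List String) :=
  [("date", ["date"]),
   ("description", ["details", "description", "narration"]),
   ("cheque", ["ref no./cheque no.", "ref no", "cheque no", "reference no"]),
   ("debit", ["debit", "withdrawal", "dr"]),
   ("credit", ["credit", "deposit", "cr"]),
   ("balance", ["balance", "running balance"])]

-- ===== PORT A =====
-- A's pass 1 for one field: first cell that is exactly one of the variants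
def exactScan (variants : List String) : List String → Int → Option Int
  | [], _ => none
  | c :: rest, i => if variants.contains c then some i else exactScan variants rest (i + 1)

-- A's pass 2 for one field: first cell containing some variant of length >= 4
def subScan (variants : List String) : List String → Int → Option Int
  | [], _ => none
  | c :: rest, i =>
    if variants.any (fun v => decide (4 ≤ PySem.Str.len v) && PySem.Str.isIn v c) then some i
    else subScan variants rest (i + 1)

def detect_columns_csb_py (row_clean : List String) : Option (List (String × Int)) :=
  let mapping := headerMap.foldl (fun m p =>
    match exactScan p.2 row_clean 0 with
    | some i => m.insert p.1 i
    | none =>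
      match subScan p.2 row_clean 0 with
      | some i => m.insert p.1 i
      | none => m) PySem.Dict.empty
  if 3 ≤ mapping.size then some mapping.items else none

-- ===== PORT B =====
-- B's single pass over the row: for each cell, update the per-field tables
-- 'exact' (first exact hit) and 'sub' (first guarded substring hit)
def rowFold : List String → Int →
    PySem.Dict String Int × PySem.Dict String Int →
    PySem.Dict String Int × PySem.Dict String Int
  | [], _, st => st
  | c :: rest, i, st =>
    rowFold rest (i + 1)
      (headerMap.foldl (fun st p =>
        (if !st.1.contains p.1 && p.2.contains c then st.1.insert p.1 i else st.1,
         if !st.2.contains p.1 &&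
             p.2.any (fun v => decide (4 ≤ PySem.Str.len v) && PySem.Str.isIn v c)
           then st.2.insert p.1 i else st.2)) st)

def detect_columns_csb_py_alt (row_clean : List String) : Option (List (String × Int)) :=
  let st := rowFold row_clean 0 (PySem.Dict.empty, PySem.Dict.empty)
  let mapping := headerMap.foldl (fun m p =>
    match st.1.get? p.1 with
    | some i => m.insert p.1 i
    | none =>
      match st.2.get? p.1 with
      | some i => m.insert p.1 i
      | none => m) PySem.Dict.empty
  if 3 ≤ mapping.size then some mapping.items else none

-- ===== PRECONDITION & SPEC =====
def Spec_detect_columns_csb_py (row_clean : List String) (out : Option (List (String × Int))) : Prop := out = detect_columns_csb_py_alt row_clean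
instance (row_clean : List String) (out : Option (List (String × Int))) : Decidable (Spec_detect_columns_csb_py row_clean out) := by unfold Spec_detect_columns_csb_py; infer_instance

-- ===== CLAIM (what is proved, stated in full; the proofs are below) =====
def Claim_equal_detect_columns_csb_py : Prop := ∀ (row_clean : List String), Dom_detect_columns_csb_py row_clean → Spec_detect_columns_csb_py row_clean (detect_columns_csb_py row_clean)

-- ===== LEMMAS AND PROOFS =====

-- abbreviation used only by the proofs: one cell's inner fold over a field list
def cellStep (L : List (String × List String)) (c : String) (i : Int)
    (st : PySem.Dict String Int × PySem.Dict String Int) :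
    PySem.Dict String Int × PySem.Dict String Int :=
  L.foldl (fun st p =>
    (if !st.1.contains p.1 && p.2.contains c then st.1.insert p.1 i else st.1,
     if !st.2.contains p.1 &&
         p.2.any (fun v => decide (4 ≤ PySem.Str.len v) && PySem.Str.isIn v c)
       then st.2.insert p.1 i else st.2)) st

theorem or_if_none (cond : Bool) (k : Int) (c : Option Int) :
    ((if cond = true then some k else none).or c) = if cond = true then some k else c := by
  cases cond <;> simp

-- fields not in L are untouched by one cell step over L
theorem cellStep_get_ne (L : List (String × List String)) (c : String) (i : Int)
    (st : PySem.Dict String Int × PySem.Dict String Int) (f : String)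
    (hne : ∀ p ∈ L, p.1 ≠ f) :
    (cellStep L c i st).1.get? f = st.1.get? f ∧ (cellStep L c i st).2.get? f = st.2.get? f := by
  induction L generalizing st with
  | nil => exact ⟨rfl, rfl⟩
  | cons r L'' ih =>
    have hr : r.1 ≠ f := hne r (List.mem_cons_self)
    have hrest : ∀ p ∈ L'', p.1 ≠ f := fun p hp => hne p (List.mem_cons_of_mem r hp)
    simp only [cellStep, List.foldl_cons] at *
    rcases ih _ hrest with ⟨h1, h2⟩
    refine ⟨h1.trans ?_, h2.trans ?_⟩ <;>
      · dsimp only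
        split
        · exact PySem.Dict.get?_insert_of_ne _ _ (fun h => hr h.symm)
        · rfl

-- the per-cell update seen by one field: how one cell step acts on get? f
theorem cellStep_get (L : List (String × List String)) (c : String) (i : Int)
    (st : PySem.Dict String Int × PySem.Dict String Int) (f : String) (V : List String)
    (hmem : (f, V) ∈ L) (hnodup : (L.map Prod.fst).Nodup) :
    (cellStep L c i st).1.get? f = (st.1.get? f).or (if V.contains c then some i else none)
    ∧ (cellStep L c i st).2.get? f
      = (st.2.get? f).or (if V.any (fun v => decide (4 ≤ PySem.Str.len v) && PySem.Str.isIn v c)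
                          then some i else none) := by
  induction L generalizing st with
  | nil => simp at hmem
  | cons q L' ih =>
    simp only [List.map_cons, List.nodup_cons] at hnodup
    rcases List.mem_cons.mp hmem with heq | hmem'
    · -- q is the field's own entry; the tail leaves f untouched
      subst heq
      have hne' : ∀ p ∈ L', p.1 ≠ f := by
        intro p hp h
        have hm : p.1 ∈ L'.map Prod.fst := List.mem_map_of_mem hp
        rw [h] at hm
        exact hnodup.1 hm
      simp only [cellStep, List.foldl_cons]
      rcases cellStep_get_ne L' c i _ f hne' with ⟨h1, h2⟩
      constructor
      · rw [show (List.foldl (fun st p =>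
            (if !st.1.contains p.1 && p.2.contains c then st.1.insert p.1 i else st.1,
             if !st.2.contains p.1 &&
                 p.2.any (fun v => decide (4 ≤ PySem.Str.len v) && PySem.Str.isIn v c)
               then st.2.insert p.1 i else st.2)) _ L') = cellStep L' c i _ from rfl, h1]
        simp only [PySem.Dict.contains_eq_isSome_get?]
        cases h : st.1.get? f with
        | some v => simp [h]
        | none =>
          simp
          split
          · exact PySem.Dict.get?_insert_self _ _ _
          · exact h
      · rw [show (List.foldl (fun st p =>
            (if !st.1.contains p.1 && p.2.contains c then st.1.insert p.1 i else st.1,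
             if !st.2.contains p.1 &&
                 p.2.any (fun v => decide (4 ≤ PySem.Str.len v) && PySem.Str.isIn v c)
               then st.2.insert p.1 i else st.2)) _ L') = cellStep L' c i _ from rfl, h2]
        simp only [PySem.Dict.contains_eq_isSome_get?]
        cases h : st.2.get? f with
        | some v => simp [h]
        | none =>
          simp
          split
          · exact PySem.Dict.get?_insert_self _ _ _
          · exact h
    · -- q is some other field: its update does not touch get? f
      have hqf : q.1 ≠ f := by
        intro h
        have hm : f ∈ L'.map Prod.fst := by
          simpa using List.mem_map_of_mem (f := Prod.fst) hmem'
        exact (h ▸ hnodup.1) hm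
      simp only [cellStep, List.foldl_cons]
      rcases ih _ hmem' hnodup.2 with ⟨h1, h2⟩
      refine ⟨h1.trans ?_, h2.trans ?_⟩ <;>
        · congr 1
          dsimp only
          split
          · exact PySem.Dict.get?_insert_of_ne _ _ (fun h => hqf h.symm)
          · rfl

-- B's row pass accumulates, per field, exactly A's two scans
theorem rowFold_get (row : List String) (k : Int)
    (st : PySem.Dict String Int × PySem.Dict String Int) (f : String) (V : List String)
    (hmem : (f, V) ∈ headerMap) (hnodup : (headerMap.map Prod.fst).Nodup) :
    (rowFold row k st).1.get? f = (st.1.get? f).or (exactScan V row k)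
    ∧ (rowFold row k st).2.get? f = (st.2.get? f).or (subScan V row k) := by
  induction row generalizing k st with
  | nil => simp [rowFold, exactScan, subScan]
  | cons c rest ih =>
    simp only [rowFold, exactScan, subScan]
    have hstep : (headerMap.foldl (fun st p =>
        (if !st.1.contains p.1 && p.2.contains c then st.1.insert p.1 k else st.1,
         if !st.2.contains p.1 &&
             p.2.any (fun v => decide (4 ≤ PySem.Str.len v) && PySem.Str.isIn v c)
           then st.2.insert p.1 k else st.2)) st) = cellStep headerMap c k st := rfl
    rw [hstep]
    rcases ih (k + 1) (cellStep headerMap c k st) with ⟨h1, h2⟩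
    rcases cellStep_get headerMap c k st f V hmem hnodup with ⟨g1, g2⟩
    constructor
    · rw [h1, g1, Option.or_assoc, or_if_none]
    · rw [h2, g2, Option.or_assoc, or_if_none]

-- ===== VERDICT (by name: the statement is the Claim_ definition above) =====
theorem detect_columns_csb_py_spec : Claim_equal_detect_columns_csb_py := by
  intro row _
  unfold Spec_detect_columns_csb_py detect_columns_csb_py detect_columns_csb_py_alt
  have hnodup : (headerMap.map Prod.fst).Nodup := by decide
  have hfold := PySem.List.foldl_congr_mem headerMap
    (fun m p =>
      match exactScan p.2 row 0 with
      | some i => m.insert p.1 i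
      | none =>
        match subScan p.2 row 0 with
        | some i => m.insert p.1 i
        | none => m)
    (fun m p =>
      match (rowFold row 0 (PySem.Dict.empty, PySem.Dict.empty)).1.get? p.1 with
      | some i => m.insert p.1 i
      | none =>
        match (rowFold row 0 (PySem.Dict.empty, PySem.Dict.empty)).2.get? p.1 with
        | some i => m.insert p.1 i
        | none => m)
    PySem.Dict.empty
    (fun m p hp => by
      rcases rowFold_get row 0 (PySem.Dict.empty, PySem.Dict.empty) p.1 p.2 hp hnodup with ⟨h1, h2⟩
      simp only [h1, h2, PySem.Dict.get?_empty, Option.none_or])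
  simp only [hfold]
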